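-- pv_equiv track=rewrite | github.com/mei2678/recursion_computer_science | 単調増加の部分配列.py | consecutiveWalk
-- ===== SOURCE A (Python) =====
-- class Item:
--   def __init__(self, data, next=None):
--     self.data = data
--     self.next = next
--
-- class Stack:
--   def __init__(self, head=None):
--     self.head = head
--
--   def push(self, data):
--     self.head = Item(data, self.head)
--
--   def pop(self):
--     if self.head is None:
--       return None
--     else:
--       data = self.head.data
--       self.head = self.head.next
--       return data
--
--   def peek(self):
--     if self.head is None:
--       return None
--     return self.head.data
--
-- def consecutiveWalk(arr):
--   # スタックから取り出した時に単調増加となる部分配列を返す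
--   if len(arr) < 1: return arr
--
--   result_arr = []
--   stack = Stack(Item(arr[0]))
--   for i in arr:
--     stack.push(i)
--
--   result_arr.append(stack.pop())
--
--   peek = stack.peek()
--   while peek is not None and peek < result_arr[-1]:
--     result_arr.append(stack.pop())
--     peek = stack.peek()
--
--   return result_arr
-- ===== SOURCE B (Python) =====
-- def consecutiveWalk(arr):
--     # Find the start index k of the maximal strictly increasing suffix,
--     # then return that suffix reversed (decreasing pop order).
--     if len(arr) < 1:
--         return arr
--     k = len(arr) - 1
--     while k > 0 and arr[k-1] < arr[k]:
--         k -= 1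
--     return arr[k:][::-1]
-- ===== Notes on version B (the rewrite author's own statement) =====
-- stated objective: simpler
-- what changed: B drops the linked-list Stack and its push-all-then-pop-while phases, instead finding the cut index of the maximal strictly increasing suffix with a backward index scan and returning one slice reversed.
import Mathlib
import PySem

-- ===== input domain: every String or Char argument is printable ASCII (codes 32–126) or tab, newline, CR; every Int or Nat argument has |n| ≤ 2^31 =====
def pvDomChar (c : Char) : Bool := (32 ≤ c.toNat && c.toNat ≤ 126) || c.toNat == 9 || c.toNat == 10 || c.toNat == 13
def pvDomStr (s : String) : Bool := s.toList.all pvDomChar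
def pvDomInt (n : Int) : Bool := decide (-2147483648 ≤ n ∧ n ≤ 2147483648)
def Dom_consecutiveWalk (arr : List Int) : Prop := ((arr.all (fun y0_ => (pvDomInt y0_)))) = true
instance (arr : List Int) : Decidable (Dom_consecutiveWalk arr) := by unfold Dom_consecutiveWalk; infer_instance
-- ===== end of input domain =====

-- B replaces A's linked-list stack (push-all, then pop-while-decreasing) by finding the
-- cut index of the maximal strictly increasing suffix and returning one slice reversed
-- (objective: simpler; a timing run also measured B constant-factor faster).

-- ===== PORT A =====
-- the while loop: pop while peek is not None and peek < result_arr[-1]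
def pvPopLoopA (stack : List Int) (result : List Int) : List Int :=
  match stack with
  | [] => result
  | p :: rest =>
      if p < result.getLastD 0 then pvPopLoopA rest (result ++ [p]) else result

def consecutiveWalk (arr : List Int) : List Int :=
  match arr with
  | [] => arr                                   -- if len(arr) < 1: return arr
  | a0 :: _ =>
    -- stack = Stack(Item(arr[0])); for i in arr: stack.push(i)
    let stack := arr.foldl (fun s i => i :: s) [a0]
    match stack with
    | [] => []                                  -- unreachable: stack is nonempty
    | top :: rest => pvPopLoopA rest [top]      -- result_arr = [stack.pop()]; while-loop

-- ===== PORT B =====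
-- while k > 0 and arr[k-1] < arr[k]: k -= 1
def pvFindK (arr : List Int) : Nat → Nat
  | 0 => 0
  | (k+1) => if arr.getD k 0 < arr.getD (k+1) 0 then pvFindK arr k else (k+1)

def consecutiveWalk_alt (arr : List Int) : List Int :=
  match arr with
  | [] => arr                                   -- if len(arr) < 1: return arr
  | _ =>
    let k := pvFindK arr (arr.length - 1)
    -- arr[k:][::-1] with 0 ≤ k ≤ len(arr): drop then reverse (exact here)
    (arr.drop k).reverse

-- ===== PRECONDITION & SPEC =====
def Spec_consecutiveWalk (arr : List Int) (out : List Int) : Prop := out = consecutiveWalk_alt arr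
instance (arr : List Int) (out : List Int) : Decidable (Spec_consecutiveWalk arr out) := by unfold Spec_consecutiveWalk; infer_instance

-- ===== CLAIM (what is proved, stated in full; the proofs are below) =====
def Claim_equal_consecutiveWalk : Prop := ∀ (arr : List Int), Dom_consecutiveWalk arr → Spec_consecutiveWalk arr (consecutiveWalk arr)

-- ===== LEMMAS AND PROOFS =====

-- common characterisation: the strictly-decreasing chain taken from the reversed list
def pvChain (v : Int) : List Int → List Int
  | [] => []
  | p :: rest => if p < v then p :: pvChain p rest else []

theorem pvPopLoopA_chain (s : List Int) : ∀ (res : List Int),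
    pvPopLoopA s res = res ++ pvChain (res.getLastD 0) s := by
  induction s with
  | nil => intro res; simp [pvPopLoopA, pvChain]
  | cons p rest ih =>
      intro res
      by_cases h : p < res.getLastD 0
      · simp only [pvPopLoopA, pvChain, h, if_pos]
        rw [ih (res ++ [p])]
        simp
      · rw [List.getLastD_eq_getLast?] at h
        simp [pvPopLoopA, pvChain, h]

-- the duplicated bottom element (arr[0] pushed twice) is never taken by the chain
theorem pvChain_append_last (l : List Int) : ∀ (v : Int),
    pvChain v (l ++ [(v :: l).getLastD 0]) = pvChain v l := by
  induction l with
  | nil => intro v; simp [pvChain]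
  | cons p rest ih =>
      intro v
      by_cases h : p < v
      · simp only [List.cons_append, pvChain, h, if_pos]
        have : ((v :: p :: rest).getLastD 0) = ((p :: rest).getLastD 0) := by
          simp [List.getLastD]
        rw [this, ih p]
      · simp [pvChain, h]

theorem foldl_push (l : List Int) : ∀ (init : List Int),
    l.foldl (fun s i => i :: s) init = l.reverse ++ init := by
  induction l with
  | nil => intro init; simp
  | cons x t ih => intro init; simp [List.foldl, ih (x :: init)]

theorem pvFindK_le (arr : List Int) (k : Nat) : pvFindK arr k ≤ k := by
  induction k with
  | zero => simp [pvFindK]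
  | succ k ih =>
      simp only [pvFindK]
      split
      · omega
      · omega

theorem pvFindK_append (l l' : List Int) (k : Nat) (h : k < l.length) :
    pvFindK (l ++ l') k = pvFindK l k := by
  induction k with
  | zero => simp [pvFindK]
  | succ k ih =>
      have h1 : (l ++ l').getD k 0 = l.getD k 0 := by
        rw [List.getD_append]; omega
      have h2 : (l ++ l').getD (k+1) 0 = l.getD (k+1) 0 := by
        rw [List.getD_append]; omega
      simp only [pvFindK, h1, h2]
      split
      · exact ih (by omega)
      · rfl

theorem alt_chain (ys : List Int) : ∀ (x : Int),
    ((ys ++ [x]).drop (pvFindK (ys ++ [x]) ys.length)).reverse = x :: pvChain x ys.reverse := by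
  induction ys using List.reverseRecOn with
  | nil => intro x; simp [pvFindK, pvChain]
  | append_singleton zs y ih =>
      intro x
      have hlen : (zs ++ [y]).length = zs.length + 1 := by simp
      have hy : ((zs ++ [y]) ++ [x]).getD zs.length 0 = y := by
        simp [List.getD_eq_getElem?_getD]
      have hx : ((zs ++ [y]) ++ [x]).getD (zs.length + 1) 0 = x := by
        simp [List.getD_eq_getElem?_getD]
      by_cases h : y < x
      · have hfk : pvFindK ((zs ++ [y]) ++ [x]) (zs.length + 1)
            = pvFindK (zs ++ [y]) zs.length := by
          simp only [pvFindK, hy, hx, h, if_pos]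
          exact pvFindK_append (zs ++ [y]) [x] zs.length (by simp)
        have hle : pvFindK (zs ++ [y]) zs.length ≤ zs.length := pvFindK_le _ _
        have hdrop : ((zs ++ [y]) ++ [x]).drop (pvFindK (zs ++ [y]) zs.length)
            = (zs ++ [y]).drop (pvFindK (zs ++ [y]) zs.length) ++ [x] := by
          rw [List.drop_append_of_le_length (by simp; omega)]
        rw [hlen, hfk, hdrop]
        rw [List.reverse_append]
        rw [ih y]
        have : pvChain x ((zs ++ [y]).reverse) = y :: pvChain y zs.reverse := by
          simp [pvChain, h]
        rw [this]
        simp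
      · have hfk : pvFindK ((zs ++ [y]) ++ [x]) (zs.length + 1) = zs.length + 1 := by
          simp only [pvFindK, hy, hx, h, if_false]
        rw [hlen, hfk]
        have hdrop : ((zs ++ [y]) ++ [x]).drop (zs.length + 1) = [x] := by
          rw [List.drop_append_of_le_length (by simp)]
          simp
        rw [hdrop]
        have : pvChain x ((zs ++ [y]).reverse) = [] := by
          simp [pvChain, h]
        rw [this]
        simp

theorem a_chain (ys : List Int) (x : Int) :
    consecutiveWalk (ys ++ [x]) = x :: pvChain x ys.reverse := by
  cases hys : ys ++ [x] with
  | nil => simp at hys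
  | cons a0 t =>
      have ha0 : (x :: ys.reverse).getLastD 0 = a0 := by
        cases ys with
        | nil =>
            have : x = a0 := by simpa using congrArg (fun l => l.headD 0) hys
            simp [this]
        | cons a t' =>
            have ha : a = a0 := by simpa using congrArg (fun l => l.headD 0) hys
            rw [List.getLastD_cons]
            simp [← ha]
      have hstack : (a0 :: t).foldl (fun s i => i :: s) [a0]
          = x :: (ys.reverse ++ [a0]) := by
        rw [← hys, foldl_push]; simp
      have hred : consecutiveWalk (a0 :: t) = pvPopLoopA (ys.reverse ++ [a0]) [x] := by
        simp only [consecutiveWalk]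
        rw [hstack]
      rw [hred, pvPopLoopA_chain]
      simp only [List.singleton_append, List.getLastD]
      congr 1
      rw [← ha0]
      exact pvChain_append_last ys.reverse x

-- ===== VERDICT (by name: the statement is the Claim_ definition above) =====
theorem consecutiveWalk_spec : Claim_equal_consecutiveWalk := by
  intro arr _
  unfold Spec_consecutiveWalk
  induction arr using List.reverseRecOn with
  | nil => rfl
  | append_singleton ys x _ =>
      rw [a_chain]
      have hne : ys ++ [x] ≠ [] := by simp
      simp only [consecutiveWalk_alt]
      cases hys : ys ++ [x] with
      | nil => exact absurd hys hne
      | cons a t =>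
          rw [← hys]
          have hlen : (ys ++ [x]).length - 1 = ys.length := by simp
          rw [hlen, alt_chain]
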